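-- pv_equiv track=rewrite | github.com/devMuniz02/UDEM-CXR-Reporting-Thesis-2025 | utils/models/gpt_models.py | _max_repeated_ngram
-- ===== SOURCE A (Python) =====
-- from typing import Optional, List, Dict, Any
--
-- def _max_repeated_ngram(ids: List[int], n: int = 3) -> int:
--     """Maximum number of times any n-gram appears (overlapping)."""
--     if len(ids) < n:
--         return 0
--     counts: Dict[tuple, int] = {}
--     for i in range(len(ids)-n+1):
--         ng = tuple(ids[i:i+n])
--         counts[ng] = counts.get(ng, 0) + 1
--     return max(counts.values()) if counts else 0
-- ===== SOURCE B (Python) =====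
-- from typing import List
--
-- def _max_repeated_ngram(ids: List[int], n: int = 3) -> int:
--     """Maximum number of times any n-gram appears (overlapping)."""
--     if len(ids) < n:
--         return 0
--     grams = sorted(tuple(ids[i:i+n]) for i in range(len(ids)-n+1))
--     best = 0
--     run = 0
--     prev = None
--     for g in grams:
--         if prev == g:
--             run += 1
--         else:
--             run = 1
--             prev = g
--         if best < run:
--             best = run
--     return best
-- ===== Notes on version B (the rewrite author's own statement) =====
-- stated objective: alternative
-- what changed: Replaces hash-table frequency counting with sort-then-scan: all n-grams are sorted and a single pass tracks the length of the current run of equal consecutive n-grams and the best run seen, which equals the maximal multiplicity.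
import Mathlib
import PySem

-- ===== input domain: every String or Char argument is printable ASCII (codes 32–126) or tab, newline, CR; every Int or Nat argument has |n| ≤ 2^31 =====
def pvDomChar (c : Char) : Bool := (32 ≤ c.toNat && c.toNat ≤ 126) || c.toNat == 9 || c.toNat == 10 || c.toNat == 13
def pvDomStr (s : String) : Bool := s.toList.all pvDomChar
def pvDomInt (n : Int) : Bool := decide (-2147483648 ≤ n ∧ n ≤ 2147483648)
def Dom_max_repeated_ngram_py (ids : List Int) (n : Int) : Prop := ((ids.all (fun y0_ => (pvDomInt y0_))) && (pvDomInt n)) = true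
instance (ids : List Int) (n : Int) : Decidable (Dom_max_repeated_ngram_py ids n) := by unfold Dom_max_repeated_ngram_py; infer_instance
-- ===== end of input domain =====

-- B replaces the frequency dict with sort-then-scan: sort the n-gram list and take the longest
-- run of equal consecutive n-grams (alternative algorithm of similar cost).


-- ===== PORT A =====
-- literal port of A: guard, then a dict counting each n-gram, then max(counts.values()) if counts else 0
def max_repeated_ngram_py (ids : List Int) (n : Int) : Int :=
  if (ids.length : Int) < n then 0
  else
    let counts : PySem.Dict (List Int) Int :=
      (PySem.List.pyRange 0 ((ids.length : Int) - n + 1) 1).foldl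
        (fun d i =>
          let ng := PySem.List.slice ids (some i) (some (i + n))
          d.insert ng (d.getD ng 0 + 1)) PySem.Dict.empty
    if counts.size ≠ 0 then
      match PySem.List.max? counts.values (fun v => v) with
      | some m => m
      | none => 0   -- unreachable: max? is none only on an empty list, excluded by the guard
    else 0

-- ===== PORT B =====
-- the lexicographic tuple comparison Python's sorted uses (sorted itself is ported as the
-- standard library's stable merge sort, List.mergeSort)
@[reducible] def pvLeGram (a b : List Int) : Bool := decide (a ≤ b)

-- one loop iteration of B: update (best, run, prev) with the next sorted n-gram g
def pvStepB (s : Int × Int × Option (List Int)) (g : List Int) : Int × Int × Option (List Int) :=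
  let best := s.1
  let run := s.2.1
  let prev := s.2.2
  let run' := if prev == some g then run + 1 else 1
  let prev' := if prev == some g then prev else some g
  (if best < run' then run' else best, run', prev')

-- literal port of B: guard, sort the n-gram list, then one pass keeping the best run of equal neighbours
def max_repeated_ngram_py_alt (ids : List Int) (n : Int) : Int :=
  if (ids.length : Int) < n then 0
  else
    let grams : List (List Int) :=
      ((PySem.List.pyRange 0 ((ids.length : Int) - n + 1) 1).map
        (fun i => PySem.List.slice ids (some i) (some (i + n)))).mergeSort pvLeGram
    (grams.foldl pvStepB ((0 : Int), (0 : Int), (none : Option (List Int)))).1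

-- ===== PRECONDITION & SPEC =====
def Spec_max_repeated_ngram_py (ids : List Int) (n : Int) (out : Int) : Prop := out = max_repeated_ngram_py_alt ids n
instance (ids : List Int) (n : Int) (out : Int) : Decidable (Spec_max_repeated_ngram_py ids n out) := by unfold Spec_max_repeated_ngram_py; infer_instance

-- ===== CLAIM (what is proved, stated in full; the proofs are below) =====
def Claim_equal_max_repeated_ngram_py : Prop := ∀ (ids : List Int) (n : Int), Dom_max_repeated_ngram_py ids n → Spec_max_repeated_ngram_py ids n (max_repeated_ngram_py ids n)

-- ===== LEMMAS AND PROOFS =====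

-- the maximal multiplicity of an element of l, as a running max over counts
def pvM (l : List (List Int)) : Int := (l.map (fun x => ((l.count x : Nat) : Int))).foldl max 0

theorem pvM_nonneg (l : List (List Int)) : 0 ≤ pvM l :=
  (PySem.List.le_foldl_max (l.map (fun x => ((l.count x : Nat) : Int))) 0).1

theorem pvM_ub (l : List (List Int)) : ∀ x ∈ l, ((l.count x : Nat) : Int) ≤ pvM l := fun x hx =>
  (PySem.List.le_foldl_max (l.map (fun x => ((l.count x : Nat) : Int))) 0).2 _
    (List.mem_map.mpr ⟨x, hx, rfl⟩)

theorem pvM_mem (l : List (List Int)) : pvM l = 0 ∨ ∃ x ∈ l, pvM l = ((l.count x : Nat) : Int) := by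
  rcases PySem.List.foldl_max_mem (l.map (fun x => ((l.count x : Nat) : Int))) 0 with h | h
  · exact Or.inl h
  · obtain ⟨x, hx, hEq⟩ := List.mem_map.mp h
    exact Or.inr ⟨x, hx, hEq.symm⟩

theorem pvM_append (p : List (List Int)) (g : List Int) :
    pvM (p ++ [g]) = max (pvM p) (((p ++ [g]).count g : Nat) : Int) := by
  apply le_antisymm
  · rcases pvM_mem (p ++ [g]) with h | ⟨x, hx, hEq⟩
    · have := pvM_nonneg p; omega
    · rcases List.mem_append.mp hx with hxp | hxg
      · by_cases hxeq : x = g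
        · subst hxeq; rw [hEq]; exact le_max_right _ _
        · have hcnt : (p ++ [g]).count x = p.count x := by
            rw [List.count_append, List.count_eq_zero.mpr (by simp [hxeq] : x ∉ [g])]
            omega
          have := pvM_ub p x hxp
          rw [hEq, hcnt]
          exact le_trans this (le_max_left _ _)
      · have hxg' : x = g := by simpa using hxg
        subst hxg'; rw [hEq]; exact le_max_right _ _
  · apply max_le
    · rcases pvM_mem p with h | ⟨x, hx, hEq⟩
      · rw [h]; exact pvM_nonneg _
      · have h1 : p.count x ≤ (p ++ [g]).count x := by
          rw [List.count_append]; omega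
        have h2 := pvM_ub (p ++ [g]) x (List.mem_append.mpr (Or.inl hx))
        rw [hEq]; omega
    · exact pvM_ub (p ++ [g]) g (List.mem_append.mpr (Or.inr (List.mem_singleton.mpr rfl)))

-- in a ≤-sorted list every element is ≤ the last one
theorem pv_le_getLast (p : List (List Int)) (lst : List Int)
    (hp : p.Pairwise (· ≤ ·)) (hl : p.getLast? = some lst) : ∀ x ∈ p, x ≤ lst := by
  induction p with
  | nil => intro x hx; exact absurd hx List.not_mem_nil
  | cons a t ih =>
    cases t with
    | nil =>
      intro x hx
      have hx' : x = a := by simpa using hx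
      have hl' : lst = a := by simpa using hl.symm
      rw [hx', hl']
    | cons b t' =>
      have hl2 : (b :: t').getLast? = some lst := by
        rw [← List.getLast?_cons_cons (l := t') (a := a) (b := b)]; exact hl
      have ha : ∀ y ∈ b :: t', a ≤ y := (List.pairwise_cons.mp hp).1
      have hp' : (b :: t').Pairwise (· ≤ ·) := (List.pairwise_cons.mp hp).2
      intro x hx
      rcases List.mem_cons.mp hx with hxa | hxt
      · subst hxa
        exact ha lst (List.mem_of_getLast? hl2)
      · exact ih hp' hl2 x hxt

-- loop invariant of B's scan over a ≤-sorted list: best = max multiplicity, run = count of the last element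
theorem pv_run_inv (p : List (List Int)) (hp : p.Pairwise (· ≤ ·)) (hne : p ≠ []) :
    ∃ lst, p.getLast? = some lst ∧
      p.foldl pvStepB ((0 : Int), (0 : Int), (none : Option (List Int)))
        = (pvM p, ((p.count lst : Nat) : Int), some lst) := by
  induction p using List.reverseRecOn with
  | nil => exact absurd rfl hne
  | append_singleton p g ih =>
    have hsplit := List.pairwise_append.mp hp
    have hp' : p.Pairwise (· ≤ ·) := hsplit.1
    have hall : ∀ x ∈ p, x ≤ g := fun x hx => hsplit.2.2 x hx g (List.mem_singleton.mpr rfl)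
    by_cases hpe : p = []
    · subst hpe
      refine ⟨g, by simp, ?_⟩
      simp [pvStepB, pvM, List.count_singleton]
    · obtain ⟨lst, hlast, hfold⟩ := ih hp' hpe
      rw [List.foldl_append, hfold]
      refine ⟨g, List.getLast?_concat, ?_⟩
      simp only [List.foldl_cons, List.foldl_nil]
      by_cases hg : lst = g
      · subst hg
        have hcnt : (p ++ [lst]).count lst = p.count lst + 1 := by
          rw [List.count_append]; simp
        rw [pvM_append, hcnt]
        simp only [pvStepB, beq_self_eq_true, if_true, Prod.mk.injEq]
        refine ⟨by push_cast; omega, by push_cast; omega, trivial⟩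
      · have hbeq : ((some lst : Option (List Int)) == some g) = false := by
          simp [hg]
        have hgnotp : g ∉ p := by
          intro hmem
          have h1 : g ≤ lst := pv_le_getLast p lst hp' hlast g hmem
          have h2 : lst ≤ g := hall lst (List.mem_of_getLast? hlast)
          exact hg (le_antisymm h2 h1)
        have hcnt : (p ++ [g]).count g = 1 := by
          rw [List.count_append, List.count_eq_zero_of_not_mem hgnotp]
          simp
        rw [pvM_append, hcnt]
        simp only [pvStepB, hbeq, Bool.false_eq_true, if_false, Prod.mk.injEq]
        refine ⟨by push_cast; omega, ?_⟩
        push_cast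
        exact ⟨trivial, trivial⟩

-- A's max over the counter's values equals the max multiplicity of the sorted gram list
theorem pv_maxval_eq (grams : List (List Int)) (hne : grams ≠ []) :
    (match PySem.List.max? (grams.foldl
        (fun d x => d.insert x (d.getD x 0 + 1)) PySem.Dict.empty).values (fun v => v) with
      | some m => m
      | none => 0)
    = pvM (grams.mergeSort pvLeGram) := by
  obtain ⟨g0, hg0⟩ : ∃ g, g ∈ grams := by
    cases grams with
    | nil => exact absurd rfl hne
    | cons a t => exact ⟨a, List.mem_cons_self⟩
  rw [PySem.Dict.foldl_insert_getD_add_one_eq_counter]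
  have hvals : (PySem.Dict.counter grams).values
      = (PySem.Set.ofList grams).map (fun k => ((List.count k grams : Nat) : Int)) := by
    simp [PySem.Dict.values, PySem.Dict.items_counter, List.map_map, Function.comp]
  rw [hvals]
  set s := grams.mergeSort pvLeGram with hs
  have hperm : s.Perm grams := List.mergeSort_perm grams pvLeGram
  have hcount : ∀ x, s.count x = grams.count x := fun x => hperm.count_eq x
  have hmem : ∀ x, x ∈ s ↔ x ∈ grams := fun x => hperm.mem_iff
  obtain ⟨v0, vt, hcons⟩ : ∃ v0 vt,
      (PySem.Set.ofList grams).map (fun k => ((List.count k grams : Nat) : Int)) = v0 :: vt := by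
    have hg0' : g0 ∈ PySem.Set.ofList grams := (PySem.Set.mem_ofList grams g0).mpr hg0
    cases hS : (PySem.Set.ofList grams : List (List Int)) with
    | nil => rw [hS] at hg0'; exact absurd hg0' (List.not_mem_nil)
    | cons a t => exact ⟨_, _, rfl⟩
  rw [hcons, PySem.List.max?_id_cons]
  show vt.foldl max v0 = pvM s
  set Aval := vt.foldl max v0 with hAval
  have hAmem : Aval ∈ v0 :: vt := by
    rcases PySem.List.foldl_max_mem vt v0 with h | h
    · rw [hAval, h]; exact List.mem_cons_self
    · exact List.mem_cons_of_mem _ h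
  have hAub : ∀ y ∈ v0 :: vt, y ≤ Aval := by
    intro y hy
    rcases List.mem_cons.mp hy with h | h
    · rw [h]; exact (PySem.List.le_foldl_max vt v0).1
    · exact (PySem.List.le_foldl_max vt v0).2 y h
  have hA_le_B : Aval ≤ pvM s := by
    have : Aval ∈ (PySem.Set.ofList grams).map (fun k => ((List.count k grams : Nat) : Int)) := by
      rw [hcons]; exact hAmem
    obtain ⟨k, hk, hEq⟩ := List.mem_map.mp this
    have hk' : k ∈ s := (hmem k).mpr ((PySem.Set.mem_ofList grams k).mp hk)
    have := pvM_ub s k hk'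
    rw [hcount k] at this
    omega
  have hB_le_A : pvM s ≤ Aval := by
    rcases pvM_mem s with h | ⟨x, hx, hEq⟩
    · have h1 := pvM_ub s g0 ((hmem g0).mpr hg0)
      have h2 : 0 < s.count g0 := List.count_pos_iff.mpr ((hmem g0).mpr hg0)
      omega
    · have hx' : x ∈ grams := (hmem x).mp hx
      have : ((List.count x grams : Nat) : Int) ∈ v0 :: vt := by
        rw [← hcons]
        exact List.mem_map.mpr ⟨x, (PySem.Set.mem_ofList grams x).mpr hx', rfl⟩
      have := hAub _ this
      rw [hEq, hcount x]
      omega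
  omega

-- the whole non-guard branch, stated over the range list r and the slice map f
theorem pv_branch (r : List Int) (f : Int → List Int) (hne : r ≠ []) :
    (if (r.foldl (fun d i =>
          d.insert (f i) (d.getD (f i) 0 + 1)) (PySem.Dict.empty : PySem.Dict (List Int) Int)).size ≠ 0 then
      match PySem.List.max? (r.foldl (fun d i =>
          d.insert (f i) (d.getD (f i) 0 + 1)) PySem.Dict.empty).values (fun v => v) with
      | some m => m
      | none => 0
    else 0)
    = (((r.map f).mergeSort pvLeGram).foldl pvStepB
        ((0 : Int), (0 : Int), (none : Option (List Int)))).1 := by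
  have hfold : r.foldl (fun d i =>
        d.insert (f i) (d.getD (f i) 0 + 1)) (PySem.Dict.empty : PySem.Dict (List Int) Int)
      = (r.map f).foldl (fun d x => d.insert x (d.getD x 0 + 1)) PySem.Dict.empty := by
    rw [List.foldl_map]
  have hgne : r.map f ≠ [] := by
    intro h; exact hne (List.map_eq_nil_iff.mp h)
  obtain ⟨g0, hg0⟩ : ∃ g, g ∈ r.map f := by
    cases hm : r.map f with
    | nil => exact absurd hm hgne
    | cons a t => exact ⟨a, hm ▸ (List.mem_cons_self : a ∈ a :: t)⟩
  have hsz : ((r.map f).foldl (fun d x => d.insert x (d.getD x 0 + 1))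
      (PySem.Dict.empty : PySem.Dict (List Int) Int)).size ≠ 0 := by
    rw [PySem.Dict.foldl_insert_getD_add_one_eq_counter]
    have hmem : (g0, ((List.count g0 (r.map f) : Nat) : Int)) ∈ (PySem.Dict.counter (r.map f)).items := by
      rw [PySem.Dict.items_counter]
      exact List.mem_map.mpr ⟨g0, (PySem.Set.mem_ofList (r.map f) g0).mpr hg0, rfl⟩
    simp only [PySem.Dict.size]
    intro hlen
    rw [List.length_eq_zero_iff.mp hlen] at hmem
    exact List.not_mem_nil hmem
  rw [hfold, if_pos hsz, pv_maxval_eq (r.map f) hgne]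
  set s := (r.map f).mergeSort pvLeGram with hs
  have hsort : s.Pairwise (· ≤ ·) := by
    have htrans : ∀ a b c : List Int, pvLeGram a b = true → pvLeGram b c = true → pvLeGram a c = true := by
      intro a b c hab hbc
      exact decide_eq_true (le_trans (of_decide_eq_true hab) (of_decide_eq_true hbc))
    have htotal : ∀ a b : List Int, (pvLeGram a b || pvLeGram b a) = true := by
      intro a b
      rcases le_total a b with h | h
      · simp [pvLeGram, h]
      · simp [pvLeGram, h]
    exact (List.pairwise_mergeSort htrans htotal (r.map f)).imp (fun hab => of_decide_eq_true hab)
  have hsne : s ≠ [] := by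
    intro h0
    have hp := (List.mergeSort_perm (r.map f) pvLeGram).symm
    rw [hs] at h0
    rw [h0] at hp
    exact hgne hp.eq_nil
  obtain ⟨lst, _, hfoldB⟩ := pv_run_inv s hsort hsne
  rw [hfoldB]

theorem pv_grams_ne_nil (ids : List Int) (n : Int) (h : ¬ (ids.length : Int) < n) :
    PySem.List.pyRange 0 ((ids.length : Int) - n + 1) 1 ≠ [] := by
  have h0 : (0 : Int) ∈ PySem.List.pyRange 0 ((ids.length : Int) - n + 1) 1 := by
    rw [PySem.List.mem_pyRange_iff_of_pos (by omega)]
    refine ⟨le_refl _, by omega, ⟨0, by ring⟩⟩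
  intro hnil
  rw [hnil] at h0
  exact List.not_mem_nil h0

-- ===== VERDICT (by name: the statement is the Claim_ definition above) =====
theorem max_repeated_ngram_py_spec : Claim_equal_max_repeated_ngram_py := by
  intro ids n _
  unfold Spec_max_repeated_ngram_py max_repeated_ngram_py max_repeated_ngram_py_alt
  by_cases hlt : (ids.length : Int) < n
  · simp [hlt]
  · simp only [if_neg hlt]
    exact pv_branch (PySem.List.pyRange 0 ((ids.length : Int) - n + 1) 1)
      (fun i => PySem.List.slice ids (some i) (some (i + n)))
      (pv_grams_ne_nil ids n hlt)
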